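-- pv_equiv track=rewrite | github.com/OrionOrionOrionOrion/cyberpunk_2025 | generator.py | group_diff
-- ===== SOURCE A (Python) =====
-- def group_diff(old: list[str], new: list[str]) -> list[list[str]]:
--     common: list[str] = []
--     min_len = min(len(old), len(new))
--     di: int
--     for i in range(min_len):
--         if old[i] == new[i]:
--             common.append(old[i])
--         else:
--             di = i
--             break
--     else:
--         di = min_len
--     diff: list[list[str]] = []
--     for i in range(di, len(new)):
--         diff.append(common + new[di:i + 1])
--     return diff
-- ===== SOURCE B (Python) =====
-- def group_diff(old: list[str], new: list[str]) -> list[list[str]]: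
--     # No divergence index: a growing prefix new[:i+1] belongs to the output
--     # exactly when it is NOT equal to the corresponding prefix of old.
--     # Build each prefix with a running accumulator and filter by that test.
--     out: list[list[str]] = []
--     acc: list[str] = []
--     for i, x in enumerate(new):
--         acc = acc + [x]
--         if acc != old[:i + 1]:
--             out.append(acc)
--     return out
-- ===== Notes on version B (the rewrite author's own statement) =====
-- stated objective: alternative
-- what changed: B computes no divergence index and has no break/else scan: it builds every growing prefix of new with a running accumulator and keeps exactly those prefixes that are not equal to the corresponding prefix of old.
import Mathlib
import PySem

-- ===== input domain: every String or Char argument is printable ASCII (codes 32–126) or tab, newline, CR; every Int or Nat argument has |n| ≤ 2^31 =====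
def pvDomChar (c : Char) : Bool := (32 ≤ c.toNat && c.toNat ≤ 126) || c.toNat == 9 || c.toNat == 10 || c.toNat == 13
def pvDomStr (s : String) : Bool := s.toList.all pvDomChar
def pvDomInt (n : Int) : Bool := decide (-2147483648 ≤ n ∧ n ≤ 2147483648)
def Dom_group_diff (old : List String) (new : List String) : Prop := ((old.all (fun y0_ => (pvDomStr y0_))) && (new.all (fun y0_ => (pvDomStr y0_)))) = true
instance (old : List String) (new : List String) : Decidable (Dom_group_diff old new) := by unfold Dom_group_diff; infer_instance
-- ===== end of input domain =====

-- B computes no divergence index and has no break/else: it builds every growing prefix of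
-- new with a running accumulator and keeps exactly those not equal to the corresponding
-- prefix of old (objective: alternative).


-- ===== PORT A =====
-- the first `for i in range(min_len)` loop with its break/else: state = (common, di)
def aScan (old new : List String) : List Int → List String → Int → (List String × Int)
  | [], common, dflt => (common, dflt)
  | i :: rest, common, dflt =>
    if PySem.List.pyGetD old i "" == PySem.List.pyGetD new i "" then
      aScan old new rest (common ++ [PySem.List.pyGetD old i ""]) dflt
    else
      (common, i)

def group_diff (old : List String) (new : List String) : List (List String) :=
  let min_len : Int := min (old.length : Int) (new.length : Int)
  let r := aScan old new (PySem.List.pyRange 0 min_len) [] min_len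
  (PySem.List.pyRange r.2 (new.length : Int)).foldl
    (fun diff i => diff ++ [r.1 ++ PySem.List.slice new (some r.2) (some (i + 1))]) []

-- ===== PORT B =====
-- the single for-loop over enumerate(new): state = (out, acc); keep acc when acc != old[:i+1]
def group_diff_alt (old : List String) (new : List String) : List (List String) :=
  ((PySem.List.enumerate new 0).foldl
    (fun (st : List (List String) × List String) p =>
      let acc := st.2 ++ [p.2]
      if acc ≠ PySem.List.slice old none (some (p.1 + 1)) then (st.1 ++ [acc], acc)
      else (st.1, acc)) ([], [])).1

-- ===== PRECONDITION & SPEC =====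
def Spec_group_diff (old : List String) (new : List String) (out : List (List String)) : Prop := out = group_diff_alt old new
instance (old : List String) (new : List String) (out : List (List String)) : Decidable (Spec_group_diff old new out) := by unfold Spec_group_diff; infer_instance

-- ===== CLAIM (what is proved, stated in full; the proofs are below) =====
def Claim_equal_group_diff : Prop := ∀ (old : List String) (new : List String), Dom_group_diff old new → Spec_group_diff old new (group_diff old new)

-- ===== LEMMAS AND PROOFS =====

-- proof-side helper: length of the common prefix of the two lists
def cp : List String → List String → Nat
  | a :: as, b :: bs => if a = b then cp as bs + 1 else 0
  | _, _ => 0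

theorem cp_nil_right (old : List String) : cp old [] = 0 := by
  cases old <;> rfl

theorem cp_le (old new : List String) : cp old new ≤ min old.length new.length := by
  induction old generalizing new with
  | nil => simp [cp]
  | cons a as ih =>
    cases new with
    | nil => simp [cp]
    | cons b bs =>
      by_cases h : a = b
      · have := ih bs
        simp only [cp, if_pos h, List.length_cons]
        omega
      · simp [cp, h]

-- invariant of A's first loop
theorem aScan_eq (old new : List String) (j : Nat) (common : List String)
    (hj : j ≤ min old.length new.length) :
    aScan old new (PySem.List.pyRange (j : Int) ((min old.length new.length : Nat) : Int)) common
        ((min old.length new.length : Nat) : Int)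
      = (common ++ (new.drop j).take (cp (old.drop j) (new.drop j)),
         ((j + cp (old.drop j) (new.drop j) : Nat) : Int)) := by
  set m := min old.length new.length with hm
  rcases Nat.lt_or_ge j m with hlt | hge
  · have hcons : PySem.List.pyRange (j : Int) (m : Int)
        = (j : Int) :: PySem.List.pyRange ((j : Int) + 1) (m : Int) :=
      PySem.List.pyRange_one_cons (by exact_mod_cast hlt)
    have hjo : j < old.length := by omega
    have hjn : j < new.length := by omega
    have hdo : old.drop j = old[j] :: old.drop (j + 1) := List.drop_eq_getElem_cons hjo
    have hdn : new.drop j = new[j] :: new.drop (j + 1) := List.drop_eq_getElem_cons hjn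
    rw [hcons]
    simp only [aScan, PySem.List.pyGetD_natCast, List.getD_eq_getElem?_getD,
      List.getElem?_eq_getElem hjo, List.getElem?_eq_getElem hjn, Option.getD_some]
    by_cases heq : old[j] = new[j]
    · have hrec := aScan_eq old new (j + 1) (common ++ [old[j]]) (by omega)
      rw [if_pos (by simp [heq]), show ((j : Int) + 1) = ((j + 1 : Nat) : Int) by push_cast; ring,
        ← hm] at *
      rw [hrec, hdo, hdn]
      simp only [cp, if_pos heq]
      rw [Prod.mk.injEq]
      refine ⟨?_, ?_⟩
      · rw [List.take_succ_cons]
        simp [List.append_assoc, heq]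
      · omega
    · rw [if_neg (by simpa using heq), hdo, hdn]
      simp only [cp, if_neg heq]
      simp
  · have hjm : j = m := le_antisymm hj hge
    have hrange : PySem.List.pyRange (j : Int) (m : Int) = [] := by
      subst hjm; simp [pysem]
    have hz : cp (old.drop j) (new.drop j) = 0 := by
      rcases Nat.le_total old.length new.length with h | h
      · have : old.drop j = [] := List.drop_eq_nil_of_le (by omega)
        rw [this]; rfl
      · have : new.drop j = [] := List.drop_eq_nil_of_le (by omega)
        rw [this, cp_nil_right]
    rw [hrange, hz]
    simp [aScan, hjm]
termination_by min old.length new.length - j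
decreasing_by omega

-- the canonical value both ports compute
def canon (new : List String) (d : Nat) : List (List String) :=
  (List.range (new.length - d)).map (fun k => new.take (d + k + 1))

-- invariant of B's loop, scanning the suffix of new starting at j with acc = new.take j
theorem alt_aux (old N : List String) : ∀ (xs : List String) (j : Nat) (out : List (List String)),
    N.drop j = xs →
    ((PySem.List.enumerate xs (j : Int)).foldl
      (fun (st : List (List String) × List String) p =>
        let acc := st.2 ++ [p.2]
        if acc ≠ PySem.List.slice old none (some (p.1 + 1)) then (st.1 ++ [acc], acc)
        else (st.1, acc)) (out, N.take j)).1
    = out ++ ((List.range' j (N.length - j)).filter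
        (fun i => decide (¬ N.take (i + 1) = old.take (i + 1)))).map (fun i => N.take (i + 1)) := by
  intro xs
  induction xs with
  | nil =>
    intro j out hdrop
    have hj : N.length ≤ j := by
      by_contra h
      have := List.drop_eq_nil_iff.mp hdrop
      omega
    have : N.length - j = 0 := by omega
    simp [PySem.List.enumerate, this]
  | cons x xs ih =>
    intro j out hdrop
    have hjlt : j < N.length := by
      by_contra h
      rw [List.drop_eq_nil_of_le (by omega)] at hdrop
      exact (List.cons_ne_nil _ _) hdrop.symm
    have hx : N[j] = x := by
      have := List.drop_eq_getElem_cons hjlt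
      rw [this] at hdrop
      exact (List.cons.injEq _ _ _ _ ▸ hdrop).1
    have hdrop' : N.drop (j + 1) = xs := by
      have := List.drop_eq_getElem_cons hjlt
      rw [this] at hdrop
      exact (List.cons.injEq _ _ _ _ ▸ hdrop).2
    have htake : N.take j ++ [x] = N.take (j + 1) := by
      rw [List.take_add_one, List.getElem?_eq_getElem hjlt]
      simp [hx]
    have hslice : PySem.List.slice old none (some ((j : Int) + 1)) = old.take (j + 1) := by
      rw [show ((j : Int) + 1) = ((j + 1 : Nat) : Int) by push_cast; ring,
        PySem.List.slice_to_natCast]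
    have hrange : List.range' j (N.length - j) = j :: List.range' (j + 1) (N.length - (j + 1)) := by
      rw [show N.length - j = (N.length - (j + 1)) + 1 by omega, List.range'_succ]
    rw [PySem.List.enumerate_cons]
    simp only [List.foldl_cons]
    rw [hrange]
    by_cases hne : N.take j ++ [x] = old.take (j + 1)
    · rw [if_neg (by simp [hne, hslice]), htake,
        show ((j : Int) + 1) = ((j + 1 : Nat) : Int) by push_cast; ring, ih (j + 1) out hdrop']
      rw [List.filter_cons]
      rw [htake] at hne
      simp [hne]
    · rw [if_pos (by simp [hne, hslice]), htake,
        show ((j : Int) + 1) = ((j + 1 : Nat) : Int) by push_cast; ring,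
        ih (j + 1) (out ++ [N.take (j + 1)]) hdrop']
      rw [List.filter_cons]
      rw [htake] at hne
      simp [hne]

-- positionwise characterisation of the prefix-equality test
theorem take_eq_iff (old : List String) : ∀ (N : List String) (i : Nat), i < N.length →
    (N.take (i + 1) = old.take (i + 1) ↔ i < cp old N) := by
  induction old with
  | nil =>
    intro N i hi
    cases N with
    | nil => simp at hi
    | cons b bs =>
      simp only [List.take_nil, cp]
      constructor
      · intro h; simp [List.take_succ_cons] at h
      · intro h; omega
  | cons a as ih =>
    intro N i hi
    cases N with
    | nil => simp at hi
    | cons b bs =>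
      cases i with
      | zero =>
        simp only [List.take_succ_cons, List.take_zero, cp]
        constructor
        · intro h
          have : b = a := by simpa using h
          simp [this]
        · intro h
          by_cases hab : a = b
          · simp [hab]
          · simp [hab] at h
      | succ i =>
        have hi' : i < bs.length := by simpa using hi
        by_cases hab : a = b
        · subst hab
          have hcp : cp (a :: as) (a :: bs) = cp as bs + 1 := by simp [cp]
          rw [List.take_succ_cons, List.take_succ_cons, hcp]
          constructor
          · intro h
            have := (ih bs i hi').mp ((List.cons.injEq _ _ _ _).mp h).2
            omega
          · intro h
            have := (ih bs i hi').mpr (by omega)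
            rw [this]
        · simp only [List.take_succ_cons, cp, if_neg hab]
          constructor
          · intro h
            exact absurd ((List.cons.injEq _ _ _ _).mp h).1.symm hab
          · intro h; omega

theorem alt_eq (old new : List String) : group_diff_alt old new = canon new (cp old new) := by
  unfold group_diff_alt
  have h0 := alt_aux old new new 0 [] (by simp)
  simp only [List.take_zero, Nat.cast_zero, Nat.sub_zero] at h0
  rw [h0, List.nil_append]
  set d := cp old new with hd
  have hdle : d ≤ new.length := by have := cp_le old new; omega
  have hsplit : List.range' 0 new.length = List.range' 0 d ++ List.range' d (new.length - d) := by
    rw [show new.length = d + (new.length - d) by omega, ← List.range'_append_1]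
    norm_num
  rw [hsplit, List.filter_append]
  have h1 : (List.range' 0 d).filter
      (fun i => decide (¬ new.take (i + 1) = old.take (i + 1))) = [] := by
    rw [List.filter_eq_nil_iff]
    intro i hi
    have hmem := List.mem_range'_1.mp hi
    have hlt : i < d := by omega
    have : new.take (i + 1) = old.take (i + 1) :=
      (take_eq_iff old new i (by omega)).mpr hlt
    simp [this]
  have h2 : (List.range' d (new.length - d)).filter
      (fun i => decide (¬ new.take (i + 1) = old.take (i + 1))) =
      List.range' d (new.length - d) := by
    rw [List.filter_eq_self]
    intro i hi
    have hmem := List.mem_range'_1.mp hi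
    have hge : ¬ i < d := by omega
    have : ¬ new.take (i + 1) = old.take (i + 1) := by
      intro h
      exact hge ((take_eq_iff old new i (by omega)).mp h)
    simp [this]
  rw [h1, h2, List.nil_append]
  unfold canon
  rw [List.range'_eq_map_range, List.map_map]
  apply List.map_congr_left
  intro k _
  simp only [Function.comp_apply]

theorem a_eq (old new : List String) : group_diff old new = canon new (cp old new) := by
  unfold group_diff
  have h0 := aScan_eq old new 0 [] (Nat.zero_le _)
  simp only [Nat.cast_zero, List.drop_zero, Nat.zero_add] at h0
  set d := cp old new with hd
  have hmin : min ((old.length : Nat) : Int) ((new.length : Nat) : Int)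
      = ((min old.length new.length : Nat) : Int) := by push_cast; simp
  simp only [hmin, h0, List.nil_append]
  rw [PySem.List.foldl_append_singleton_eq_map]
  simp only [List.nil_append]
  have hd_le : d ≤ new.length := by
    have := cp_le old new; omega
  rw [PySem.List.pyRange_one]
  have hsub : (((new.length : Nat) : Int) - ((d : Nat) : Int)).toNat = new.length - d := by
    omega
  rw [hsub, List.map_map]
  unfold canon
  congr 1
  funext k
  simp only [Function.comp]
  rw [show ((d : Int) + (k : Int) + 1) = (((d + k + 1 : Nat)) : Int) by push_cast; ring]
  rw [PySem.List.slice_natCast]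
  have h1 : d + k + 1 - d = k + 1 := by omega
  rw [h1]
  calc List.take d new ++ List.take (k + 1) (List.drop d new)
      = List.take (d + (k + 1)) new := (List.take_add).symm
    _ = List.take (d + k + 1) new := by rw [show d + (k + 1) = d + k + 1 by omega]

-- ===== VERDICT (by name: the statement is the Claim_ definition above) =====
theorem group_diff_spec : Claim_equal_group_diff := by
  intro old new _
  unfold Spec_group_diff
  rw [a_eq, alt_eq]
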